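-- pv_equiv track=rewrite | github.com/BattleWoLFz99/Data-Structures-and-Algorithms-in-Python | by Days/W1 Intro/Day 0/String/9. el1819 Logest Semi Alternating Substring.py | longestSemiAlternatingSubstring
-- ===== SOURCE A (Python) =====
-- def longestSemiAlternatingSubstring(s):
--     if len(s) < 3:
--         return len(s)
--
--     res, cnt = 0, 1
--     left = 0
--     for right in range(len(s)):
--         if right > 0 and s[right] == s[right - 1]:
--             cnt += 1
--         else:
--             cnt = 1
--         if cnt == 3:
--             left = right - 1
--             cnt = 2
--         # no need to check if never cnt == 3:
--         res = max(res, right - left + 1)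
--
--
--     return res
-- ===== SOURCE B (Python) =====
-- def _flush(res, cur, runlen):
--     # fold one maximal run of equal characters into the window state
--     if runlen <= 2:
--         cur += runlen
--         res = max(res, cur)
--     else:
--         res = max(res, cur + 2)
--         cur = 2
--     return res, cur
--
-- def longestSemiAlternatingSubstring(s):
--     if len(s) < 3:
--         return len(s)
--     res = cur = 0
--     runch, runlen = s[0], 0
--     for ch in s:
--         if ch == runch:
--             runlen += 1
--         else:
--             res, cur = _flush(res, cur, runlen)
--             runch, runlen = ch, 1
--     res, cur = _flush(res, cur, runlen)
--     return res
-- ===== Notes on version B (the rewrite author's own statement) =====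
-- stated objective: alternative
-- what changed: Replaced A's per-character sliding window (left pointer with a cnt==3 reset) by a fold over the maximal runs of equal characters: each run is folded into the window state by a flush step (short runs extend the window, a run of length >= 3 caps the carried window at its last two characters).
import Mathlib
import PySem

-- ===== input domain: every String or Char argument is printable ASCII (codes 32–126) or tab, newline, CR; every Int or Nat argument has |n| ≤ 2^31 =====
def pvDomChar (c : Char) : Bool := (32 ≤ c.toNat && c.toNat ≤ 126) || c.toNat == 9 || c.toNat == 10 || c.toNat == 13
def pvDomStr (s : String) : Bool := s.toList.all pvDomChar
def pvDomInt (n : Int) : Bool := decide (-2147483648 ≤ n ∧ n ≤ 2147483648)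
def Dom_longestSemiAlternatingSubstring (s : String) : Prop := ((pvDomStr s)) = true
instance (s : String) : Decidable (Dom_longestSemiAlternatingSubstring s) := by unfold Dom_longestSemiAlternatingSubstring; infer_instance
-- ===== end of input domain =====

-- B replaces A's per-character sliding window (left pointer + cnt reset) by a fold over the
-- maximal runs of equal characters; same return value, alternative decomposition.

-- ===== PORT A =====
def longestSemiAlternatingSubstring (s : String) : Int :=
  if PySem.Str.len s < 3 then PySem.Str.len s
  else
    (((PySem.List.pyRange 0 (PySem.Str.len s) 1).foldl
      (fun (st : Int × Int × Int) right =>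
        let cnt : Int :=
          if right > 0 ∧ PySem.Str.pyGet? s right = PySem.Str.pyGet? s (right - 1)
          then st.2.1 + 1 else 1
        let p : Int × Int := if cnt = 3 then (right - 1, 2) else (st.2.2, cnt)
        (max st.1 (right - p.1 + 1), p.2, p.1))
      (0, 1, 0)) : Int × Int × Int).1

-- ===== PORT B =====
-- helper _flush: fold one maximal run of equal characters into the window state
def bFlush (res cur runlen : Int) : Int × Int :=
  if runlen ≤ 2 then (max res (cur + runlen), cur + runlen)
  else (max res (cur + 2), 2)

def bLoop (res cur : Int) (runch : Char) (runlen : Int) : List Char → Int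
  | [] => (bFlush res cur runlen).1
  | c :: rest =>
    if c = runch then bLoop res cur runch (runlen + 1) rest
    else
      let p := bFlush res cur runlen
      bLoop p.1 p.2 c 1 rest

def longestSemiAlternatingSubstring_alt (s : String) : Int :=
  if PySem.Str.len s < 3 then PySem.Str.len s
  else
    match s.toList with
    | [] => 0
    | c0 :: rest => bLoop 0 0 c0 0 (c0 :: rest)

-- ===== PRECONDITION & SPEC =====
def Spec_longestSemiAlternatingSubstring (s : String) (out : Int) : Prop := out = longestSemiAlternatingSubstring_alt s
instance (s : String) (out : Int) : Decidable (Spec_longestSemiAlternatingSubstring s out) := by unfold Spec_longestSemiAlternatingSubstring; infer_instance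

-- ===== CLAIM (what is proved, stated in full; the proofs are below) =====
def Claim_equal_longestSemiAlternatingSubstring : Prop := ∀ (s : String), Dom_longestSemiAlternatingSubstring s → Spec_longestSemiAlternatingSubstring s (longestSemiAlternatingSubstring s)

-- ===== LEMMAS AND PROOFS =====

-- A's loop, re-expressed as a structural recursion over the remaining characters,
-- carrying the previous character explicitly.
def aRec (prev : Char) (right res cnt left : Int) : List Char → Int
  | [] => res
  | c :: rest =>
    let cnt : Int := if c = prev then cnt + 1 else 1
    let p : Int × Int := if cnt = 3 then (right - 1, 2) else (left, cnt)
    aRec c (right + 1) (max res (right - p.1 + 1)) p.2 p.1 rest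

-- the body of A's foldl, on the character list
def aF (cs : List Char) (st : Int × Int × Int) (right : Int) : Int × Int × Int :=
  let cnt : Int :=
    if right > 0 ∧ PySem.List.pyGet? cs right = PySem.List.pyGet? cs (right - 1)
    then st.2.1 + 1 else 1
  let p : Int × Int := if cnt = 3 then (right - 1, 2) else (st.2.2, cnt)
  (max st.1 (right - p.1 + 1), p.2, p.1)

lemma bridgeA (l : List Char) : ∀ (cs : List Char) (i : Nat) (prev : Char) (res cnt left : Int),
    cs.drop i = l → 1 ≤ i → cs[i-1]? = some prev →
    ((PySem.List.pyRange (i : Int) (cs.length : Int) 1).foldl (aF cs) (res, cnt, left)).1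
      = aRec prev (i : Int) res cnt left l := by
  induction l with
  | nil =>
    intro cs i prev res cnt left hd hi hp
    have hlen : cs.length ≤ i := by
      have := congrArg List.length hd
      simp only [List.length_drop, List.length_nil] at this
      omega
    rw [PySem.List.pyRange_one_eq_nil (by exact_mod_cast hlen)]
    simp [aRec]
  | cons c rest ih =>
    intro cs i prev res cnt left hd hi hp
    have hlen : i < cs.length := by
      have := congrArg List.length hd
      simp only [List.length_drop, List.length_cons] at this
      omega
    have hd' : cs.drop (i+1) = rest := by
      rw [List.drop_add_one_eq_tail_drop, hd]; rfl
    have hci : cs[i]? = some c := by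
      have h0 : (cs.drop i)[0]? = some c := by rw [hd]; rfl
      rw [List.getElem?_drop] at h0; simpa using h0
    have hg1 : PySem.List.pyGet? cs ((i : Int)) = some c := by
      simp [PySem.List.pyGet?_natCast, hci]
    have hg2 : PySem.List.pyGet? cs ((i : Int) - 1) = some prev := by
      have hcast : ((i : Int) - 1) = ((i - 1 : Nat) : Int) := by omega
      rw [hcast, PySem.List.pyGet?_natCast, hp]
    have hpos : (0 : Int) < (i : Int) := by exact_mod_cast hi
    rw [PySem.List.pyRange_one_cons (by exact_mod_cast hlen), List.foldl_cons]
    have hstep : aF cs (res, cnt, left) (i : Int) =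
        (let cnt' : Int := if c = prev then cnt + 1 else 1
         let p : Int × Int := if cnt' = 3 then ((i : Int) - 1, 2) else (left, cnt')
         (max res ((i : Int) - p.1 + 1), p.2, p.1)) := by
      simp only [aF, hg1, hg2]
      have : ((i : Int) > 0 ∧ (some c : Option Char) = some prev) ↔ c = prev := by
        constructor
        · rintro ⟨_, h⟩; injection h
        · intro h; exact ⟨hpos, by rw [h]⟩
      simp only [this]
    rw [hstep]
    have hcast1 : ((i : Int) + 1) = (((i + 1 : Nat)) : Int) := by push_cast; ring
    by_cases hc : c = prev
    · by_cases h3 : cnt + 1 = 3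
      · simp only [if_pos hc, if_pos h3, aRec]
        rw [hcast1]
        exact ih cs (i+1) c _ _ _ hd' (by omega) (by simpa using hci)
      · simp only [if_pos hc, if_neg h3, aRec]
        rw [hcast1]
        exact ih cs (i+1) c _ _ _ hd' (by omega) (by simpa using hci)
    · have h13 : ¬ ((1 : Int) = 3) := by norm_num
      simp only [if_neg hc, if_neg h13, aRec]
      rw [hcast1]
      exact ih cs (i+1) c _ _ _ hd' (by omega) (by simpa using hci)

lemma bFlush_fst (res cur L : Int) :
    (bFlush res cur L).1 = if L ≤ 2 then max res (cur + L) else max res (cur + 2) := by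
  unfold bFlush; split_ifs <;> rfl

lemma bFlush_snd (res cur L : Int) :
    (bFlush res cur L).2 = if L ≤ 2 then cur + L else 2 := by
  unfold bFlush; split_ifs <;> rfl

lemma mainAB (l : List Char) : ∀ (prev : Char) (right res cnt left resB cur runlen : Int),
    1 ≤ runlen → 0 ≤ cur →
    res = (bFlush resB cur runlen).1 → right - left = (bFlush resB cur runlen).2 →
    cnt = min runlen 2 →
    aRec prev right res cnt left l = bLoop resB cur prev runlen l := by
  induction l with
  | nil =>
    intro prev right res cnt left resB cur runlen h1 h2 h3 h4 h5
    simp only [aRec, bLoop]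
    exact h3
  | cons c rest ih =>
    intro prev right res cnt left resB cur runlen h1 h2 h3 h4 h5
    rw [bFlush_fst] at h3
    rw [bFlush_snd] at h4
    by_cases hc : c = prev
    · subst hc
      simp only [aRec, bLoop, if_true]
      rcases lt_trichotomy runlen 2 with hr | hr | hr
      · have h33 : ¬ (cnt + 1 = 3) := by omega
        simp only [if_neg h33]
        refine ih c (right+1) _ _ _ resB cur (runlen+1) (by omega) h2 ?_ ?_ (by omega)
        · rw [bFlush_fst]; split_ifs at h3 h4 ⊢ <;> omega
        · rw [bFlush_snd]; split_ifs at h3 h4 ⊢ <;> omega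
      · have h33 : cnt + 1 = 3 := by omega
        simp only [if_pos h33]
        refine ih c (right+1) _ _ _ resB cur (runlen+1) (by omega) h2 ?_ ?_ (by omega)
        · rw [bFlush_fst]; split_ifs at h3 h4 ⊢ <;> omega
        · rw [bFlush_snd]; split_ifs at h3 h4 ⊢ <;> omega
      · have h33 : cnt + 1 = 3 := by omega
        simp only [if_pos h33]
        refine ih c (right+1) _ _ _ resB cur (runlen+1) (by omega) h2 ?_ ?_ (by omega)
        · rw [bFlush_fst]; split_ifs at h3 h4 ⊢ <;> omega
        · rw [bFlush_snd]; split_ifs at h3 h4 ⊢ <;> omega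
    · have h13 : ¬ ((1 : Int) = 3) := by norm_num
      simp only [aRec, bLoop, if_neg hc, if_neg h13]
      refine ih c (right+1) _ _ _ _ _ 1 le_rfl ?_ ?_ ?_ (by omega)
      · rw [bFlush_snd]; split_ifs at h4 ⊢ <;> omega
      · rw [bFlush_fst, bFlush_fst, bFlush_snd]
        split_ifs at h3 h4 ⊢ <;> omega
      · rw [bFlush_snd, bFlush_snd]
        split_ifs at h4 ⊢ <;> omega

-- ===== VERDICT (by name: the statement is the Claim_ definition above) =====
theorem longestSemiAlternatingSubstring_spec : Claim_equal_longestSemiAlternatingSubstring := by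
  intro s _
  show longestSemiAlternatingSubstring s = longestSemiAlternatingSubstring_alt s
  unfold longestSemiAlternatingSubstring longestSemiAlternatingSubstring_alt
  by_cases hlen : PySem.Str.len s < 3
  · rw [if_pos hlen, if_pos hlen]
  · rw [if_neg hlen, if_neg hlen]
    have hlenS : PySem.Str.len s = ((s.toList.length : Nat) : Int) := by
      have h : s.toList.length = s.length := String.length_toList
      simp only [PySem.Str.len_eq, h]
    have hlen3 : 3 ≤ s.toList.length := by rw [hlenS] at hlen; omega
    cases hcs : s.toList with
    | nil => rw [hcs] at hlen3; simp at hlen3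
    | cons c0 rest =>
      have hfun : (fun (st : Int × Int × Int) (right : Int) =>
          let cnt : Int :=
            if right > 0 ∧ PySem.Str.pyGet? s right = PySem.Str.pyGet? s (right - 1)
            then st.2.1 + 1 else 1
          let p : Int × Int := if cnt = 3 then (right - 1, 2) else (st.2.2, cnt)
          (max st.1 (right - p.1 + 1), p.2, p.1)) = aF s.toList := by
        funext st right
        simp [aF, PySem.Str.pyGet?_eq, PySem.Chars.pyGet?_eq_listPyGet?]
      rw [hfun, hlenS, hcs]
      rw [PySem.List.pyRange_one_cons (by exact_mod_cast Nat.succ_pos rest.length)]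
      rw [List.foldl_cons]
      have hstep0 : aF (c0 :: rest) ((0 : Int), (1 : Int), (0 : Int)) 0 = (1, 1, 0) := by
        norm_num [aF]
      rw [hstep0, show ((0:Int)+1) = ((1:Nat):Int) by norm_num]
      rw [bridgeA rest (c0 :: rest) 1 c0 1 1 0 rfl le_rfl rfl]
      show aRec c0 ((1:Nat):Int) 1 1 0 rest = bLoop 0 0 c0 0 (c0 :: rest)
      rw [show (bLoop 0 0 c0 0 (c0 :: rest)) = bLoop 0 0 c0 1 rest by simp [bLoop]]
      exact mainAB rest c0 _ 1 1 0 0 0 1 le_rfl le_rfl (by norm_num [bFlush])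
        (by push_cast; norm_num [bFlush]) (by norm_num)
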